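-- pv_equiv track=rewrite | github.com/LaNadKo/CCTV | processor/gui/app.py | _sanitize_divisor
-- ===== SOURCE A (Python) =====
-- _FREQUENCY_PRESETS: list[tuple[str, int]] = [
--     ("Покадровая", 1),
--     ("/2", 2),
--     ("/4", 4),
--     ("/8", 8),
--     ("/16", 16),
--     ("/32", 32),
--     ("/64", 64),
--     ("1 кадр / 5 сек", 120),
-- ]
--
-- def _sanitize_divisor(value: object, fallback: int) -> int:
--     try:
--         raw = int(value)
--     except (TypeError, ValueError):
--         raw = fallback
--     if raw <= 0:
--         raw = fallback
--     for _, candidate in _FREQUENCY_PRESETS: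
--         if raw <= candidate:
--             return candidate
--     return _FREQUENCY_PRESETS[-1][1]
-- ===== SOURCE B (Python) =====
-- _FREQUENCY_PRESETS: list[tuple[str, int]] = [
--     ("Покадровая", 1),
--     ("/2", 2),
--     ("/4", 4),
--     ("/8", 8),
--     ("/16", 16),
--     ("/32", 32),
--     ("/64", 64),
--     ("1 кадр / 5 сек", 120),
-- ]
--
-- _VALUES = [c for _, c in _FREQUENCY_PRESETS]
--
--
-- def _sanitize_divisor(value: object, fallback: int) -> int:
--     try:
--         raw = int(value)
--     except (TypeError, ValueError):
--         raw = fallback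
--     if raw <= 0:
--         raw = fallback
--     # binary search: leftmost preset value >= raw (bisect_left)
--     lo, hi = 0, len(_VALUES)
--     while lo < hi:
--         mid = (lo + hi) // 2
--         if _VALUES[mid] < raw:
--             lo = mid + 1
--         else:
--             hi = mid
--     return _VALUES[lo] if lo < len(_VALUES) else _VALUES[-1]
-- ===== Notes on version B (the rewrite author's own statement) =====
-- stated objective: alternative
-- what changed: The linear first-match scan over the preset pairs is replaced by a hand-rolled bisect_left binary search over the precomputed ascending value list, indexing the result (with the same last-value fall-through).
import Mathlib
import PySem

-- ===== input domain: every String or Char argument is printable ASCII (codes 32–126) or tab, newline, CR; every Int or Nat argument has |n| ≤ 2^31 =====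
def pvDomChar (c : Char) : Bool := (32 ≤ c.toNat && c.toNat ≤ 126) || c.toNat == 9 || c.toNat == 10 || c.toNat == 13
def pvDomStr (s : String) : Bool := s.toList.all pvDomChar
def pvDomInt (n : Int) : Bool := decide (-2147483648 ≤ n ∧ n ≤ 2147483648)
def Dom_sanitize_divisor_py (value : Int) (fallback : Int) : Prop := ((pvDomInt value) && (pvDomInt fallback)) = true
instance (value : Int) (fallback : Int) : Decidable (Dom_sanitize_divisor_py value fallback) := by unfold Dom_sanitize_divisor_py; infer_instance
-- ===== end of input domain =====

-- B replaces A's linear first-match scan over the presets by a bisect_left binary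
-- search over the precomputed ascending value list (alternative decomposition).

-- ===== PORT A =====
def pvPresets : List (String × Int) :=
  [("Покадровая", 1), ("/2", 2), ("/4", 4), ("/8", 8),
   ("/16", 16), ("/32", 32), ("/64", 64), ("1 кадр / 5 сек", 120)]

-- the for-loop: first candidate with raw ≤ candidate, else _FREQUENCY_PRESETS[-1][1]
def pvLoopA (raw : Int) : List (String × Int) → Int
  | [] => match PySem.List.pyGet? pvPresets (-1) with
          | some p => p.2
          | none => 0
  | p :: rest => if raw ≤ p.2 then p.2 else pvLoopA raw rest

def sanitize_divisor_py (value : Int) (fallback : Int) : Int :=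
  -- value is an Int, so int(value) never raises; raw = value
  let raw := value
  let raw := if raw ≤ 0 then fallback else raw
  pvLoopA raw pvPresets

-- ===== PORT B =====
def pvValues : List Int := pvPresets.map Prod.snd

-- the while-loop of the binary search (bisect_left); terminates since hi - lo shrinks
def pvBisect (raw : Int) (lo hi : Nat) : Nat :=
  if lo < hi then
    let mid := (lo + hi) / 2
    if pvValues.getD mid 0 < raw then pvBisect raw (mid + 1) hi
    else pvBisect raw lo mid
  else lo
termination_by hi - lo
decreasing_by all_goals omega

def sanitize_divisor_py_alt (value : Int) (fallback : Int) : Int :=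
  let raw := value
  let raw := if raw ≤ 0 then fallback else raw
  let lo := pvBisect raw 0 pvValues.length
  if lo < pvValues.length then pvValues.getD lo 0
  else match PySem.List.pyGet? pvValues (-1) with
       | some v => v
       | none => 0

-- ===== PRECONDITION & SPEC =====
def Spec_sanitize_divisor_py (value : Int) (fallback : Int) (out : Int) : Prop := out = sanitize_divisor_py_alt value fallback
instance (value : Int) (fallback : Int) (out : Int) : Decidable (Spec_sanitize_divisor_py value fallback out) := by unfold Spec_sanitize_divisor_py; infer_instance

-- ===== CLAIM (what is proved, stated in full; the proofs are below) =====
def Claim_equal_sanitize_divisor_py : Prop := ∀ (value : Int) (fallback : Int), Dom_sanitize_divisor_py value fallback → Spec_sanitize_divisor_py value fallback (sanitize_divisor_py value fallback)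

-- ===== LEMMAS AND PROOFS =====
-- Both results depend only on the sanitized raw; agreement for every raw : Int.
lemma pv_core (raw : Int) :
    pvLoopA raw pvPresets =
      (let lo := pvBisect raw 0 pvValues.length
       if lo < pvValues.length then pvValues.getD lo 0
       else match PySem.List.pyGet? pvValues (-1) with
            | some v => v
            | none => 0) := by
  by_cases h1 : raw ≤ 1
  · simp [pvLoopA, pvPresets, pvBisect, pvValues, PySem.List.pyGet?, PySem.List.pyIdx?, h1,
      show ¬ (1 : Int) < raw by omega, show ¬ (2 : Int) < raw by omega, show ¬ (4 : Int) < raw by omega, show ¬ (8 : Int) < raw by omega, show ¬ (16 : Int) < raw by omega, show ¬ (32 : Int) < raw by omega, show ¬ (64 : Int) < raw by omega, show ¬ (120 : Int) < raw by omega]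
  by_cases h2 : raw ≤ 2
  · simp [pvLoopA, pvPresets, pvBisect, pvValues, PySem.List.pyGet?, PySem.List.pyIdx?, h1, h2,
      show (1 : Int) < raw by omega, show ¬ (2 : Int) < raw by omega, show ¬ (4 : Int) < raw by omega, show ¬ (8 : Int) < raw by omega, show ¬ (16 : Int) < raw by omega, show ¬ (32 : Int) < raw by omega, show ¬ (64 : Int) < raw by omega, show ¬ (120 : Int) < raw by omega]
  by_cases h4 : raw ≤ 4
  · simp [pvLoopA, pvPresets, pvBisect, pvValues, PySem.List.pyGet?, PySem.List.pyIdx?, h1, h2, h4,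
      show (1 : Int) < raw by omega, show (2 : Int) < raw by omega, show ¬ (4 : Int) < raw by omega, show ¬ (8 : Int) < raw by omega, show ¬ (16 : Int) < raw by omega, show ¬ (32 : Int) < raw by omega, show ¬ (64 : Int) < raw by omega, show ¬ (120 : Int) < raw by omega]
  by_cases h8 : raw ≤ 8
  · simp [pvLoopA, pvPresets, pvBisect, pvValues, PySem.List.pyGet?, PySem.List.pyIdx?, h1, h2, h4, h8,
      show (1 : Int) < raw by omega, show (2 : Int) < raw by omega, show (4 : Int) < raw by omega, show ¬ (8 : Int) < raw by omega, show ¬ (16 : Int) < raw by omega, show ¬ (32 : Int) < raw by omega, show ¬ (64 : Int) < raw by omega, show ¬ (120 : Int) < raw by omega]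
  by_cases h16 : raw ≤ 16
  · simp [pvLoopA, pvPresets, pvBisect, pvValues, PySem.List.pyGet?, PySem.List.pyIdx?, h1, h2, h4, h8, h16,
      show (1 : Int) < raw by omega, show (2 : Int) < raw by omega, show (4 : Int) < raw by omega, show (8 : Int) < raw by omega, show ¬ (16 : Int) < raw by omega, show ¬ (32 : Int) < raw by omega, show ¬ (64 : Int) < raw by omega, show ¬ (120 : Int) < raw by omega]
  by_cases h32 : raw ≤ 32
  · simp [pvLoopA, pvPresets, pvBisect, pvValues, PySem.List.pyGet?, PySem.List.pyIdx?, h1, h2, h4, h8, h16, h32,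
      show (1 : Int) < raw by omega, show (2 : Int) < raw by omega, show (4 : Int) < raw by omega, show (8 : Int) < raw by omega, show (16 : Int) < raw by omega, show ¬ (32 : Int) < raw by omega, show ¬ (64 : Int) < raw by omega, show ¬ (120 : Int) < raw by omega]
  by_cases h64 : raw ≤ 64
  · simp [pvLoopA, pvPresets, pvBisect, pvValues, PySem.List.pyGet?, PySem.List.pyIdx?, h1, h2, h4, h8, h16, h32, h64,
      show (1 : Int) < raw by omega, show (2 : Int) < raw by omega, show (4 : Int) < raw by omega, show (8 : Int) < raw by omega, show (16 : Int) < raw by omega, show (32 : Int) < raw by omega, show ¬ (64 : Int) < raw by omega, show ¬ (120 : Int) < raw by omega]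
  by_cases h120 : raw ≤ 120
  · simp [pvLoopA, pvPresets, pvBisect, pvValues, PySem.List.pyGet?, PySem.List.pyIdx?, h1, h2, h4, h8, h16, h32, h64, h120,
      show (1 : Int) < raw by omega, show (2 : Int) < raw by omega, show (4 : Int) < raw by omega, show (8 : Int) < raw by omega, show (16 : Int) < raw by omega, show (32 : Int) < raw by omega, show (64 : Int) < raw by omega, show ¬ (120 : Int) < raw by omega]
  · simp [pvLoopA, pvPresets, pvBisect, pvValues, PySem.List.pyGet?, PySem.List.pyIdx?, h1, h2, h4, h8, h16, h32, h64, h120,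
      show (1 : Int) < raw by omega, show (2 : Int) < raw by omega, show (4 : Int) < raw by omega, show (8 : Int) < raw by omega, show (16 : Int) < raw by omega, show (32 : Int) < raw by omega, show (64 : Int) < raw by omega, show (120 : Int) < raw by omega]

-- ===== VERDICT (by name: the statement is the Claim_ definition above) =====
theorem sanitize_divisor_py_spec : Claim_equal_sanitize_divisor_py := by
  intro value fallback _
  unfold Spec_sanitize_divisor_py sanitize_divisor_py sanitize_divisor_py_alt
  exact pv_core _
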